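-- pv_equiv track=rewrite | github.com/zceekja/transpiler_info1910 | transpiler.py | array_char
-- ===== SOURCE A (Python) =====
-- def array_char(line):
--     braket = 0
--     first_chars = line[0:5]
--     out = ""
--     if first_chars == "char ":
--         a = line[5:]
--
--     for char in a:
--         if braket == 0:
--             if char != '[':
--
--                 out += char
--             elif char == '[':
--                 braket += 1
--                 out += " = ["
--         else:
--             if char == ']':
--                 out += char
--     return out +"\n"
-- ===== SOURCE B (Python) =====
-- def array_char(line):
--     if line[0:5] == "char ":
--         a = line[5:]
--     if '[' in a:
--         head, rest = a.split('[', 1)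
--         return head + " = [" + "]" * rest.count(']') + "\n"
--     return a + "\n"
-- ===== Notes on version B (the rewrite author's own statement) =====
-- stated objective: simpler
-- what changed: Replaces the per-character bracket-state machine with a single split at the first '[' plus a count of ']' in the remainder (head + ' = [' + ']'*count).
import Mathlib
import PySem

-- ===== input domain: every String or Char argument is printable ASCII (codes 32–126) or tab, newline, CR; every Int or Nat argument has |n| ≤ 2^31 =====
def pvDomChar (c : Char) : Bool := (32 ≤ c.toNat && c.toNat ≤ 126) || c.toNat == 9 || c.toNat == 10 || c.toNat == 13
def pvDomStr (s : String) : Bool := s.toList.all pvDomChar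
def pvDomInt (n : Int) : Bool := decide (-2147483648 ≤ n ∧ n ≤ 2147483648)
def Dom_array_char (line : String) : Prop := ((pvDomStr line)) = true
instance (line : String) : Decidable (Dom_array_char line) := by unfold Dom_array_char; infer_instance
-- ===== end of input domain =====

-- B replaces A's per-character bracket-state machine by split-at-first-'['
-- plus a count of ']' in the remainder (simpler); both raise on non-"char " lines.

-- ===== PORT A =====
-- A's for-loop over a with state (braket, out); out kept as List Char ('out += char').
def array_char (line : String) : String :=
  let first_chars := PySem.Str.slice line (some 0) (some 5)
  let a := if first_chars = "char " then PySem.Str.slice line (some 5) none else ""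
  let r := a.toList.foldl
    (fun (s : Int × List Char) (c : Char) =>
      if s.1 = 0 then
        if c ≠ '[' then (s.1, s.2 ++ [c])
        else (s.1 + 1, s.2 ++ " = [".toList)
      else
        if c = ']' then (s.1, s.2 ++ [c]) else s)
    ((0 : Int), ([] : List Char))
  String.ofList (r.2 ++ ['\n'])

-- ===== PORT B =====
-- Source B: split('[', 1) ported as takeWhile / (dropWhile …).tail; ']'*rest.count(']') as replicate.
def array_char_alt (line : String) : String :=
  if PySem.Str.slice line (some 0) (some 5) = "char " then
    let a := (PySem.Str.slice line (some 5) none).toList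
    if '[' ∈ a then
      let head := a.takeWhile (· ≠ '[')
      let rest := (a.dropWhile (· ≠ '[')).tail
      String.ofList (head ++ " = [".toList ++ List.replicate (rest.count ']') ']' ++ ['\n'])
    else String.ofList (a ++ ['\n'])
  else String.ofList ['\n']

-- ===== PRECONDITION & SPEC =====
-- Pre_ excludes lines whose first five characters are not "char ": there Python A
-- (and B) raise UnboundLocalError, since 'a' is only assigned under that guard.
def Pre_array_char (line : String) : Prop :=
  PySem.Str.slice line (some 0) (some 5) = "char "
instance (line : String) : Decidable (Pre_array_char line) := by unfold Pre_array_char; infer_instance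

def pvWitness_array_char : String := "char x[3]"

def Spec_array_char (line : String) (out : String) : Prop := out = array_char_alt line
instance (line : String) (out : String) : Decidable (Spec_array_char line out) := by unfold Spec_array_char; infer_instance

-- ===== CLAIM (what is proved, stated in full; the proofs are below) =====
def Claim_equal_array_char : Prop :=
  ∀ (line : String), Dom_array_char line → Pre_array_char line → Spec_array_char line (array_char line)

-- ===== LEMMAS AND PROOFS =====

-- A's loop body, named for the lemmas.
def pvStepA (s : Int × List Char) (c : Char) : Int × List Char :=
  if s.1 = 0 then
    if c ≠ '[' then (s.1, s.2 ++ [c])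
    else (s.1 + 1, s.2 ++ " = [".toList)
  else
    if c = ']' then (s.1, s.2 ++ [c]) else s

-- In bracket mode (state 1) the loop appends exactly the ']' characters, in order.
lemma foldl_stepA_one (cs : List Char) (out : List Char) :
    cs.foldl pvStepA (1, out) = (1, out ++ List.replicate (cs.count ']') ']') := by
  induction cs generalizing out with
  | nil => simp
  | cons c cs ih =>
    by_cases h : c = ']'
    · subst h
      rw [List.foldl_cons]
      have hs : pvStepA (1, out) ']' = (1, out ++ [']']) := by simp [pvStepA]
      rw [hs, ih]
      simp [List.replicate_succ, List.append_assoc]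
    · simp [List.foldl_cons, pvStepA, h, ih]

-- Before any '[' (state 0) the loop copies characters; at the first '[' it emits " = ["
-- and switches to bracket mode.
lemma foldl_stepA_zero (cs : List Char) (out : List Char) :
    cs.foldl pvStepA (0, out) =
      if '[' ∈ cs then
        (1, out ++ cs.takeWhile (· ≠ '[') ++ " = [".toList
             ++ List.replicate (((cs.dropWhile (· ≠ '[')).tail).count ']') ']')
      else (0, out ++ cs) := by
  induction cs generalizing out with
  | nil => simp
  | cons c cs ih =>
    by_cases h : c = '['
    · subst h
      simp [List.foldl_cons, pvStepA, foldl_stepA_one]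
    · have hm : ('[' ∈ c :: cs) ↔ ('[' ∈ cs) := by simp [eq_comm, h]
      by_cases hmem : '[' ∈ cs
      · simp [List.foldl_cons, pvStepA, h, ih, hmem]
      · simp [List.foldl_cons, pvStepA, h, ih, hmem, hm]

-- ===== VERDICT (by name: the statement is the Claim_ definition above) =====
theorem array_char_spec : Claim_equal_array_char := by
  intro line _ hpre
  unfold Spec_array_char array_char array_char_alt
  simp only [Pre_array_char] at hpre
  simp only [hpre]
  show String.ofList ((((PySem.Str.slice line (some 5) none).toList.foldl pvStepA ((0 : Int), ([] : List Char))).2) ++ ['\n']) = _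
  rw [foldl_stepA_zero]
  by_cases hmem : '[' ∈ PySem.List.slice line.toList (some 5) none
  · simp [hmem]
  · simp [hmem]
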